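-- pv_equiv track=rewrite | github.com/hyeyeonismm/codeSprinterss | hyeyeonismm/Math_Implement/PGS_70129.py | solution
-- ===== SOURCE A (Python) =====
-- def solution(s):
--     answer = [0,0]
--
--     while s != '1':
--         ans=''
--         answer[0]+=1
--         answer[1] += s.count('0')
--         s = s.replace('0','')
--         new_s = len(s)
--
--         while new_s:
--             ans+= str(new_s%2)
--             new_s //=2
--         s = ans
--
--     return answer
-- ===== SOURCE B (Python) =====
-- def solution(s):
--     if s == '1':
--         return [0, 0]
--     zeros0 = s.count('0')
--     # trajectory of ones-counts: n, popcount(n), ... down to 1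
--     traj = [len(s) - zeros0]
--     while traj[-1] != 1:
--         traj.append(bin(traj[-1]).count('1'))
--     total = zeros0 + sum(n.bit_length() for n in traj[:-1]) - sum(traj[1:])
--     return [len(traj), total]
-- ===== Notes on version B (the rewrite author's own statement) =====
-- stated objective: alternative
-- what changed: B first materializes the whole trajectory of ones-counts (n, popcount(n), ... , 1) as a list via integer bit arithmetic, then computes both answers by aggregation (len of the list; zeros as sum of bit_lengths minus sum of successors), instead of A's single loop that rewrites the string and accumulates counters each round.
import Mathlib
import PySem

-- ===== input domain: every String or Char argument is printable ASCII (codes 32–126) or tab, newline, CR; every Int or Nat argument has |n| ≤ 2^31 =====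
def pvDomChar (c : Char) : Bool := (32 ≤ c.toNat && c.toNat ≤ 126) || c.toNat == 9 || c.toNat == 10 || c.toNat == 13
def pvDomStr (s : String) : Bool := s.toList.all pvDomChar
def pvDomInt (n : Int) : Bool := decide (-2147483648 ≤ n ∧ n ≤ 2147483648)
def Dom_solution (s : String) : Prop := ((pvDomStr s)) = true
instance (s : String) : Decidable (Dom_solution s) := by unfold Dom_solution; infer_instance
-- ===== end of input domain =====

-- B first materializes the whole trajectory of ones-counts as an integer list, then
-- aggregates (length, and sum of bit_lengths minus sum of successors), instead of A's
-- single string-rewriting loop with in-loop counters.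

-- ===== PORT A =====
-- inner 'while new_s: ans += str(new_s%2); new_s //= 2' loop of A
def binRev (ans : String) (ns : Int) : String :=
  if _h : ns ≤ 0 then ans
  else binRev (ans ++ PySem.Int.toStr (PySem.Int.mod ns 2)) (PySem.Int.floordiv ns 2)
termination_by ns.toNat
decreasing_by
  rw [PySem.Int.floordiv_eq_ediv_of_pos (by omega : (0:Int) < 2)]
  omega

-- the outer 'while s != '1'' loop; the fuel argument only makes the loop total in Lean
-- (on strings of only '0's, excluded by Pre_solution, the Python loops forever)
def aLoop : Nat → String → Int → Int → List Int
  | 0, _, a0, a1 => [a0, a1]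
  | f + 1, s, a0, a1 =>
    if s = "1" then [a0, a1]
    else
      let a0' := a0 + 1
      let a1' := a1 + (PySem.Str.count s "0" : Int)
      let s' := PySem.Str.replace s "0" ""
      let newS : Int := PySem.Str.len s'
      aLoop f (binRev "" newS) a0' a1'

def solution (s : String) : List Int := aLoop (s.toList.length + 8) s 0 0

-- ===== PORT B =====
-- B's 'while traj[-1] != 1: traj.append(...)' loop, as the evident cons recursion on the
-- value just appended; same totality fuel as A's port (diverges only outside Pre_solution)
def traj : Nat → Int → List Int
  | 0, n => [n]
  | f + 1, n => if n = 1 then [n] else n :: traj f (PySem.Int.bitCount n : Int)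

-- traj[:-1] and traj[1:] are ported as List.dropLast and List.tail (exact for these slices)
def solution_alt (s : String) : List Int :=
  if s = "1" then [0, 0]
  else
    let zeros0 : Int := (PySem.Str.count s "0" : Int)
    let t := traj (s.toList.length + 7) (PySem.Str.len s - zeros0)
    let total : Int :=
      zeros0 + ((t.dropLast).map (fun n => (PySem.Int.bitLength n : Int))).sum - (t.tail).sum
    [(t.length : Int), total]

-- ===== PRECONDITION & SPEC =====
-- Pre_ excludes exactly the strings consisting only of '0' (including ""), on which
-- the Python A loops forever (never returns): s must contain a character other than '0'.
def Pre_solution (s : String) : Prop := s.toList.count '0' < s.toList.length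
instance (s : String) : Decidable (Pre_solution s) := by unfold Pre_solution; infer_instance
def pvWitness_solution : String := "1011"

def Spec_solution (s : String) (out : List Int) : Prop := out = solution_alt s
instance (s : String) (out : List Int) : Decidable (Spec_solution s out) := by unfold Spec_solution; infer_instance

-- ===== CLAIM (what is proved, stated in full; the proofs are below) =====
def Claim_equal_solution : Prop := ∀ (s : String), Dom_solution s → Pre_solution s → Spec_solution s (solution s)

-- ===== LEMMAS AND PROOFS =====

-- reversed binary digits of m (what A's inner loop appends for new_s = m), on the list side
def binChars : Nat → List Char
  | 0 => []
  | m + 1 => (if (m + 1) % 2 = 1 then '1' else '0') :: binChars ((m + 1) / 2)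

theorem binRev_toList (m : Nat) : ∀ (ans : String),
    (binRev ans (m : Int)).toList = ans.toList ++ binChars m := by
  induction m using Nat.strong_induction_on with
  | _ m ih =>
    intro ans
    match m with
    | 0 => rw [binRev]; simp [binChars]
    | k + 1 =>
      rw [binRev]
      have h2 : PySem.Int.mod ((k + 1 : Nat) : Int) 2 = (((k + 1) % 2 : Nat) : Int) := by
        exact_mod_cast PySem.Int.mod_natCast (k + 1) 2
      have h3 : PySem.Int.floordiv ((k + 1 : Nat) : Int) 2 = (((k + 1) / 2 : Nat) : Int) := by
        exact_mod_cast PySem.Int.floordiv_natCast (k + 1) 2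
      have hk : ¬ ((k + 1 : Nat) : Int) ≤ 0 := by omega
      rw [dif_neg hk, h2, h3, ih ((k + 1) / 2) (by omega)]
      rw [String.toList_append]
      conv_rhs => rw [binChars]
      rcases Nat.mod_two_eq_zero_or_one (k + 1) with h | h
      · simp [h, PySem.Int.toList_toStr, show PySem.Int.toChars 0 = ['0'] from by decide]
      · simp [h, PySem.Int.toList_toStr, show PySem.Int.toChars 1 = ['1'] from by decide]

theorem bitCount_pos (m : Nat) (hm : 0 < m) : 1 ≤ PySem.Int.bitCount (m : Int) := by
  induction m using Nat.strong_induction_on with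
  | _ m ih =>
    rw [PySem.Int.bitCount_natCast hm]
    rcases Nat.mod_two_eq_zero_or_one m with h | h
    · have : 0 < m / 2 := by omega
      have := ih (m / 2) (by omega) this
      omega
    · omega

theorem bitCount_lt (m : Nat) (hm : 2 ≤ m) : PySem.Int.bitCount (m : Int) < m := by
  induction m using Nat.strong_induction_on with
  | _ m ih =>
    rw [PySem.Int.bitCount_natCast (by omega : 0 < m)]
    by_cases h2 : 2 ≤ m / 2
    · have := ih (m / 2) (by omega) h2
      omega
    · have h1 : 1 ≤ PySem.Int.bitCount ((m / 2 : Nat) : Int) →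
          PySem.Int.bitCount ((m / 2 : Nat) : Int) = PySem.Int.bitCount ((m / 2 : Nat) : Int) := by
        intro _; rfl
      -- here m = 2 or m = 3, so m / 2 = 1
      have hm2 : m / 2 = 1 := by omega
      rw [hm2, show PySem.Int.bitCount ((1 : Nat) : Int) = 1 from by decide]
      omega

theorem binChars_stats (m : Nat) (hm : 0 < m) :
    (binChars m).length = PySem.Int.bitLength (m : Int) ∧
    (binChars m).count '0' + PySem.Int.bitCount (m : Int) = PySem.Int.bitLength (m : Int) := by
  induction m using Nat.strong_induction_on with
  | _ m ih =>
    match m, hm with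
    | k + 1, _ =>
      have hEq : binChars (k + 1) = (if (k + 1) % 2 = 1 then '1' else '0') :: binChars ((k + 1) / 2) := by
        rw [binChars]
      rw [hEq, PySem.Int.bitLength_natCast (by omega : 0 < k + 1),
          PySem.Int.bitCount_natCast (by omega : 0 < k + 1)]
      by_cases hh : (k + 1) / 2 = 0
      · have hk : k = 0 := by omega
        subst hk
        have e0 : binChars (1 / 2) = [] := by rw [show (1 : Nat) / 2 = 0 from rfl, binChars]
        rw [e0]
        norm_num [PySem.Int.bitLength_zero, PySem.Int.bitCount_zero]
        decide
      · obtain ⟨ih1, ih2⟩ := ih ((k + 1) / 2) (by omega) (by omega)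
        refine ⟨by rw [List.length_cons, ih1], ?_⟩
        rcases Nat.mod_two_eq_zero_or_one (k + 1) with h | h
        · rw [if_neg (by omega), List.count_cons, h,
              show (('0' : Char) == '0') = true from by decide, if_pos rfl]
          omega
        · rw [if_pos h, List.count_cons, h,
              show (('1' : Char) == '0') = false from by decide, if_neg (by simp)]
          omega

theorem bitLength_pos (m : Nat) (hm : 0 < m) : 1 ≤ PySem.Int.bitLength (m : Int) := by
  rw [PySem.Int.bitLength_natCast hm]; omega

theorem binChars_ne_one (m : Nat) (hm : 2 ≤ m) : binChars m ≠ ['1'] := by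
  intro h
  have h1 := (binChars_stats m (by omega)).1
  rw [h] at h1
  have h2 : PySem.Int.bitLength ((m : Nat) : Int) = PySem.Int.bitLength ((m / 2 : Nat) : Int) + 1 :=
    PySem.Int.bitLength_natCast (by omega)
  have h3 := bitLength_pos (m / 2) (by omega)
  simp at h1
  omega

theorem countGo (l : List Char) : ∀ (fuel acc : Nat), l.length ≤ fuel →
    PySem.Chars.count.go ['0'] fuel l acc = acc + l.count '0' := by
  induction l with
  | nil => intro fuel acc _; cases fuel <;> simp [PySem.Chars.count.go]
  | cons c t ih =>
    intro fuel acc h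
    match fuel with
    | f + 1 =>
      rw [PySem.Chars.count.go]
      by_cases hc : c = '0'
      · subst hc
        simp [List.isPrefixOf, ih f (acc + 1) (by simpa using h)]
        omega
      · have hp : (['0'].isPrefixOf (c :: t)) = false := by
          simp [List.isPrefixOf]; exact fun a => absurd a.symm hc
        simp [hp, ih f acc (by simpa using h), hc]

theorem replGo (l : List Char) : ∀ (fuel : Nat) (acc : List Char), l.length ≤ fuel →
    PySem.Chars.replace.go ['0'] [] fuel l acc = acc.reverse ++ l.filter (fun c => !(c == '0')) := by
  induction l with
  | nil => intro fuel acc _; cases fuel <;> simp [PySem.Chars.replace.go]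
  | cons c t ih =>
    intro fuel acc h
    match fuel with
    | f + 1 =>
      rw [PySem.Chars.replace.go]
      by_cases hc : c = '0'
      · subst hc
        simp [List.isPrefixOf, ih f acc (by simpa using h)]
      · have hp : (['0'].isPrefixOf (c :: t)) = false := by
          simp [List.isPrefixOf]; exact fun a => absurd a.symm hc
        simp [hp, ih f (c :: acc) (by simpa using h), hc]

theorem strCount0 (s : String) : PySem.Str.count s "0" = s.toList.count '0' := by
  rw [PySem.Str.count_eq]
  show PySem.Chars.count s.toList ['0'] = _
  rw [PySem.Chars.count, if_neg (by decide), countGo s.toList s.toList.length 0 (le_refl _)]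
  omega

theorem filterLen (l : List Char) :
    (l.filter (fun c => !(c == '0'))).length + l.count '0' = l.length := by
  induction l with
  | nil => simp
  | cons c t ih =>
    by_cases hc : c = '0'
    · simp [hc]
      omega
    · simp [hc]
      omega

theorem strReplaceLen (s : String) :
    (PySem.Str.replace s "0" "").toList.length + s.toList.count '0' = s.toList.length := by
  rw [PySem.Str.toList_replace]
  show (PySem.Chars.replace s.toList ['0'] []).length + _ = _
  rw [PySem.Chars.replace, if_neg (by decide), replGo s.toList s.toList.length [] (le_refl _)]
  simp only [List.reverse_nil, List.nil_append]
  exact filterLen s.toList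

theorem binChars_one : binChars 1 = ['1'] := by
  rw [binChars]
  norm_num
  rw [binChars]

theorem aLoop_one (f : Nat) (a0 a1 : Int) : aLoop f "1" a0 a1 = [a0, a1] := by
  cases f <;> simp [aLoop]

-- traj always begins with its argument
theorem traj_cons (f : Nat) (n : Int) : ∃ t, traj f n = n :: t := by
  cases f with
  | zero => exact ⟨[], rfl⟩
  | succ f =>
    by_cases h : n = 1
    · exact ⟨[], by simp [traj, h]⟩
    · exact ⟨traj f (PySem.Int.bitCount n : Int), by simp [traj, h]⟩

-- core correspondence: one round of A's loop per cons of B's trajectory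
theorem mainLemma (m : Nat) : 1 ≤ m → ∀ (f : Nat), m ≤ f → ∀ (s : String) (a0 a1 : Int),
    s ≠ "1" → s.toList.count '0' + m = s.toList.length →
    aLoop (f + 1) s a0 a1 =
      [a0 + ((traj f (m : Int)).length : Int),
       a1 + (s.toList.count '0' : Int)
          + (((traj f (m : Int)).dropLast).map (fun n => (PySem.Int.bitLength n : Int))).sum
          - ((traj f (m : Int)).tail).sum] := by
  induction m using Nat.strong_induction_on with
  | _ m ih =>
    intro hm f hf s a0 a1 hne hstat
    rw [aLoop, if_neg hne]
    dsimp only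
    have hrl := strReplaceLen s
    have hlen : PySem.Str.len (PySem.Str.replace s "0" "") = ((m : Nat) : Int) := by
      rw [PySem.Str.len_eq]; omega
    rw [strCount0, hlen]
    match m, hm with
    | 1, _ =>
      have hb : binRev "" ((1 : Nat) : Int) = "1" := by
        apply String.toList_inj.mp
        rw [binRev_toList, binChars_one]
        decide
      rw [hb, aLoop_one]
      obtain ⟨f', rfl⟩ : ∃ f', f = f' + 1 := ⟨f - 1, by omega⟩
      simp [traj]
    | k + 2, _ =>
      set m := k + 2 with hmdef
      have h2 : 2 ≤ m := by omega
      have htl : (binRev "" ((m : Nat) : Int)).toList = binChars m := by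
        rw [binRev_toList]; simp
      have hne' : binRev "" ((m : Nat) : Int) ≠ "1" := by
        intro hcon
        exact binChars_ne_one m h2 (by rw [← htl, hcon]; decide)
      obtain ⟨hs1, hs2⟩ := binChars_stats m (by omega)
      have hpc1 := bitCount_pos m (by omega)
      have hpclt := bitCount_lt m h2
      obtain ⟨f', rfl⟩ : ∃ f', f = f' + 1 := ⟨f - 1, by omega⟩
      · have hih := ih (PySem.Int.bitCount ((m : Nat) : Int)) (by omega) hpc1 f' (by omega)
          (binRev "" ((m : Nat) : Int)) (a0 + 1) (a1 + (s.toList.count '0' : Int)) hne'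
          (by rw [htl]; omega)
        rw [hih, htl]
        have hmne1 : ((m : Nat) : Int) ≠ 1 := by omega
        have hcast : ((PySem.Int.bitCount ((m : Nat) : Int) : Nat) : Int)
            = (PySem.Int.bitCount ((m : Nat) : Int) : Int) := rfl
        conv_rhs => rw [traj, if_neg hmne1]
        obtain ⟨t', ht'⟩ := traj_cons f' ((PySem.Int.bitCount ((m : Nat) : Int) : Nat) : Int)
        rw [ht']
        have hdl : ((((m : Nat) : Int) :: ((PySem.Int.bitCount ((m : Nat) : Int) : Nat) : Int) :: t').dropLast)
            = ((m : Nat) : Int) :: ((((PySem.Int.bitCount ((m : Nat) : Int) : Nat) : Int) :: t').dropLast) := by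
          simp
        rw [hdl]
        simp only [List.length_cons, List.tail_cons, List.map_cons, List.sum_cons]
        have hbl : (PySem.Int.bitLength ((m : Nat) : Int) : Int)
            = ((binChars m).count '0' : Int) + (PySem.Int.bitCount ((m : Nat) : Int) : Int) := by
          omega
        simp only [List.cons.injEq, and_true]
        refine ⟨by push_cast; ring, ?_⟩
        rw [hbl]
        ring

-- ===== VERDICT (by name: the statement is the Claim_ definition above) =====
theorem solution_spec : Claim_equal_solution := by
  intro s _hdom hpre
  have hpre' : s.toList.count '0' < s.toList.length := hpre
  unfold Spec_solution solution solution_alt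
  by_cases h1 : s = "1"
  · subst h1; rw [aLoop_one]; simp
  · rw [if_neg h1]
    dsimp only
    have hz := strCount0 s
    have hm : s.toList.count '0' + (s.toList.length - s.toList.count '0') = s.toList.length := by
      omega
    have hlenz : PySem.Str.len s - (PySem.Str.count s "0" : Int)
        = ((s.toList.length - s.toList.count '0' : Nat) : Int) := by
      rw [PySem.Str.len_eq, hz]; omega
    rw [hlenz, strCount0]
    have hmain := mainLemma (s.toList.length - s.toList.count '0') (by omega)
      (s.toList.length + 7) (by omega) s 0 0 h1 hm
    have e : s.toList.length + 7 + 1 = s.toList.length + 8 := rfl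
    rw [e] at hmain
    rw [hmain]
    norm_num
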